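-- pv_equiv track=rewrite | github.com/DungDeta/Advent-of-code-2024 | day_12/day_12.py | to_ractangle
-- ===== SOURCE A (Python) =====
-- def to_ractangle(input):
--     R = len(input)
--     C = max(len(row) for row in input)
--     grid = [[''] * C for _ in range(R)]
--     for x in range(R):
--         for y in range(len(input[x])):
--             grid[x][y] = input[x][y]
--     return grid
-- ===== SOURCE B (Python) =====
-- def to_ractangle(input):
--     C = max(len(row) for row in input)
--     cols = [[row[y] if y < len(row) else '' for row in input] for y in range(C)]
--     return [[col[x] for col in cols] for x in range(len(input))]
-- ===== Notes on version B (the rewrite author's own statement) =====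
-- stated objective: alternative
-- what changed: builds the rectangle column-major (one padded column per column index) and then transposes back, instead of preallocating an all-'' row-major rectangle and overwriting cells row by row
import Mathlib
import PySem

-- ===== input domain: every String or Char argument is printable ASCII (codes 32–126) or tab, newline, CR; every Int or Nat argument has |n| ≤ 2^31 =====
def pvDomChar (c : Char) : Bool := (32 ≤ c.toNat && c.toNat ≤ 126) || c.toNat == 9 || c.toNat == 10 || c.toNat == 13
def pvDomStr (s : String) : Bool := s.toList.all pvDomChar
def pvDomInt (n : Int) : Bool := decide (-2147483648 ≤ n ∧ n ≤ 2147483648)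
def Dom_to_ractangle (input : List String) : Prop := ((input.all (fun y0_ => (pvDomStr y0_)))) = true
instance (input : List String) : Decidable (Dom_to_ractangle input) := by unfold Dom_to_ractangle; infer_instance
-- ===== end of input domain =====

-- B builds the rectangle column-major (one padded column per column index) and transposes back (objective: alternative).

-- ===== PORT A =====
def to_ractangle (input : List String) : List (List String) :=
  let R : Int := input.length
  let C : Int := (PySem.List.max? (input.map (fun row => PySem.Str.len row)) id).getD 0
  let grid : List (List String) := (PySem.List.pyRange 0 R 1).map (fun _ => List.replicate C.toNat "")
  (PySem.List.pyRange 0 R 1).foldl (fun g x =>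
    let row := PySem.List.pyGetD input x ""
    g.set x.toNat
      ((PySem.List.pyRange 0 (PySem.Str.len row) 1).foldl
        (fun r y => r.set y.toNat (String.mk [row.toList.getD y.toNat ' '])) (g.getD x.toNat []))) grid

-- ===== PORT B =====
def to_ractangle_alt (input : List String) : List (List String) :=
  let C : Int := (PySem.List.max? (input.map (fun row => PySem.Str.len row)) id).getD 0
  let cols : List (List String) := (PySem.List.pyRange 0 C 1).map (fun y =>
    input.map (fun row =>
      if y < PySem.Str.len row then String.mk [row.toList.getD y.toNat ' '] else ""))
  (PySem.List.pyRange 0 (input.length : Int) 1).map (fun x =>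
    cols.map (fun col => PySem.List.pyGetD col x ""))

-- ===== PRECONDITION & SPEC =====
-- Pre_ excludes the empty list, on which A raises ValueError (max() of an empty generator).
def Pre_to_ractangle (input : List String) : Prop := input ≠ []
instance (input : List String) : Decidable (Pre_to_ractangle input) := by unfold Pre_to_ractangle; infer_instance
def pvWitness_to_ractangle : List String := ["ab", "c"]
def Spec_to_ractangle (input : List String) (out : List (List String)) : Prop := out = to_ractangle_alt input
instance (input : List String) (out : List (List String)) : Decidable (Spec_to_ractangle input out) := by unfold Spec_to_ractangle; infer_instance

-- ===== CLAIM (what is proved, stated in full; the proofs are below) =====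
def Claim_equal_to_ractangle : Prop := ∀ (input : List String), Dom_to_ractangle input → Pre_to_ractangle input → Spec_to_ractangle input (to_ractangle input)

-- ===== LEMMAS AND PROOFS =====

-- the common "padded grid" both programs compute
def pvPadded (input : List String) (C : Nat) : List (List String) :=
  input.map (fun row =>
    row.toList.map (fun c => String.mk [c]) ++ List.replicate (C - row.toList.length) "")

-- max? of a nonempty list is some
lemma max?_isSome_cons (x : Int) (xs : List Int) : (PySem.List.max? (x :: xs) id).isSome := by
  induction xs generalizing x with
  | nil => simp [PySem.List.max?]
  | cons y ys ih =>
    have := ih (max x y)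
    simp only [PySem.List.max?, List.foldl] at *
    split_ifs <;> simp_all [PySem.List.max?]

-- the inner per-row loop of A, acting on a fresh all-'' row of width C, produces the padded row
lemma inner_fold_aux (cs : List Char) (C : Nat) (hC : cs.length ≤ C) :
    ∀ n, n ≤ cs.length →
      (PySem.List.pyRange 0 (n : Int) 1).foldl
        (fun r y => r.set y.toNat (String.mk [cs.getD y.toNat ' '])) (List.replicate C "")
      = (cs.take n).map (fun c => String.mk [c]) ++ List.replicate (C - n) "" := by
  intro n
  induction n with
  | zero => intro _; simp [PySem.List.pyRange_one_eq_nil]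
  | succ n ih =>
    intro h
    rw [Nat.cast_add, Nat.cast_one, PySem.List.pyRange_one_succ_right (by positivity),
      List.foldl_append, ih (by omega)]
    simp only [List.foldl]
    have hn : n < cs.length := by omega
    have hlen : ((cs.take n).map (fun c => String.mk [c])).length = n := by
      simp [List.length_take, Nat.min_eq_left (le_of_lt hn)]
    rw [show ((n : Int)).toNat = n from rfl, List.set_append, hlen, if_neg (by omega)]
    have hrep : (List.replicate (C - n) "").set (n - n) (String.mk [cs.getD n ' '])
        = String.mk [cs.getD n ' '] :: List.replicate (C - (n + 1)) "" := by
      have : C - n = (C - (n + 1)) + 1 := by omega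
      rw [this, Nat.sub_self, List.replicate_succ, List.set_cons_zero]
    rw [hrep, show cs.take (n + 1) = cs.take n ++ [cs[n]] from by
        rw [List.take_add_one, List.getElem?_eq_getElem hn]; rfl]
    simp [List.getD, List.getElem?_eq_getElem hn]
    rw [List.take_add_one, List.getElem?_map, List.getElem?_eq_getElem hn]
    simp

-- outer loop: fold over row indices k..R-1, rows before k already done
lemma outer_fold (input : List String) (C : Nat)
    (hC : ∀ s ∈ input, s.toList.length ≤ C) :
    ∀ (k : Nat) (done : List (List String)), done.length = k → k ≤ input.length →
      (PySem.List.pyRange (k : Int) (input.length : Int) 1).foldl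
        (fun g x =>
          g.set x.toNat
            ((PySem.List.pyRange 0 (PySem.Str.len (PySem.List.pyGetD input x "")) 1).foldl
              (fun r y => r.set y.toNat
                (String.mk [(PySem.List.pyGetD input x "").toList.getD y.toNat ' ']))
              (g.getD x.toNat [])))
        (done ++ (input.drop k).map (fun _ => List.replicate C ""))
      = done ++ (input.drop k).map
          (fun row => row.toList.map (fun c => String.mk [c])
            ++ List.replicate (C - row.toList.length) "") := by
  intro k
  induction hm : input.length - k generalizing k with
  | zero =>
    intro done hd hk
    have hk' : input.length = k := by omega
    rw [PySem.List.pyRange_one_eq_nil (by exact_mod_cast Nat.le_of_eq hk')]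
    simp [hk', List.drop_length]
  | succ m ih =>
    intro done hd hk
    have hlt : k < input.length := by omega
    rw [PySem.List.pyRange_one_cons (by exact_mod_cast hlt), List.foldl_cons]
    have hdrop : input.drop k = input[k] :: input.drop (k + 1) := List.drop_eq_getElem_cons hlt
    have hrow : PySem.List.pyGetD input (k : Int) "" = input[k] := by
      rw [PySem.List.pyGetD_natCast]; simp [List.getD, List.getElem?_eq_getElem hlt]
    have htoNat : ((k : Int)).toNat = k := by simp
    have hget : (done ++ (input.drop k).map (fun _ => List.replicate C "")).getD k []
        = List.replicate C "" := by
      rw [List.getD_append_right _ _ _ _ (by omega), hd, Nat.sub_self, hdrop,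
        List.map_cons, List.getD_cons_zero]
    have hinner :
        (PySem.List.pyRange 0 (PySem.Str.len input[k]) 1).foldl
          (fun r y => r.set y.toNat (String.mk [(input[k]).toList.getD y.toNat ' ']))
          (List.replicate C "")
        = (input[k]).toList.map (fun c => String.mk [c])
            ++ List.replicate (C - (input[k]).toList.length) "" := by
      have h' := inner_fold_aux (input[k]).toList C (hC _ (List.getElem_mem hlt))
        (input[k]).toList.length le_rfl
      rw [List.take_length] at h'
      rw [PySem.Str.len_eq]
      exact h'
    rw [hrow, htoNat, hget, hinner]
    have hset : (done ++ (input.drop k).map (fun _ => List.replicate C "")).set k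
          ((input[k]).toList.map (fun c => String.mk [c])
            ++ List.replicate (C - (input[k]).toList.length) "")
        = (done ++ [(input[k]).toList.map (fun c => String.mk [c])
            ++ List.replicate (C - (input[k]).toList.length) ""])
          ++ (input.drop (k + 1)).map (fun _ => List.replicate C "") := by
      rw [List.set_append, hd, if_neg (by omega), Nat.sub_self, hdrop,
        List.map_cons, List.set_cons_zero, List.append_assoc, List.singleton_append]
    rw [hset, show ((k : Int) + 1) = (((k + 1 : Nat)) : Int) by push_cast; ring,
      ih (k + 1) (by omega) _ (by simp [hd]) (by omega), hdrop]
    simp only [List.map_cons, List.append_assoc, List.singleton_append]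

-- A computes the padded grid
lemma a_eq_padded (input : List String) (C : Nat)
    (hmax : PySem.List.max? (input.map (fun row => PySem.Str.len row)) id = some (C : Int)) :
    to_ractangle input = pvPadded input C := by
  have hub : ∀ s ∈ input, s.toList.length ≤ C := by
    intro s hs
    have h1 := PySem.List.max?_isMax hmax (PySem.Str.len s) (List.mem_map_of_mem hs)
    rw [PySem.Str.len_eq] at h1
    simp only [id] at h1
    omega
  unfold to_ractangle pvPadded
  simp only [hmax, Option.getD_some, Int.toNat_natCast]
  have hgrid : (PySem.List.pyRange 0 ((input.length : Int)) 1).map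
        (fun _ => List.replicate C "")
      = (input.drop 0).map (fun _ => List.replicate C "") := by
    rw [List.map_const', List.map_const']
    simp [PySem.List.length_pyRange_one]
  rw [hgrid]
  have := outer_fold input C hub 0 [] rfl (by omega)
  simpa using this

-- one padded row, read off column-by-column
lemma b_row (cs : List Char) (C : Int) (hC : (cs.length : Int) ≤ C) :
    (PySem.List.pyRange 0 C 1).map
      (fun y => if y < (cs.length : Int) then String.mk [cs.getD y.toNat ' '] else "")
    = cs.map (fun c => String.mk [c]) ++ List.replicate (C.toNat - cs.length) "" := by
  apply List.ext_getElem
  · simp [PySem.List.length_pyRange_one]; omega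
  · intro i h1 h2
    simp only [List.length_map, PySem.List.length_pyRange_one] at h1
    rw [List.getElem_map, PySem.List.getElem_pyRange_one]
    · 
      by_cases hi : i < cs.length
      · rw [List.getElem_append_left (by simpa using hi)]
        simp [List.getD, List.getElem?_eq_getElem hi, hi]
      · rw [List.getElem_append_right (by simpa using hi)]
        have hni : ¬ ((i : Int) < (cs.length : Int)) := by push_cast; omega
        simp only [zero_add, if_neg hni, List.getElem_replicate]

-- B computes the padded grid
lemma b_eq_padded (input : List String) (C : Nat)
    (hmax : PySem.List.max? (input.map (fun row => PySem.Str.len row)) id = some (C : Int)) :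
    to_ractangle_alt input = pvPadded input C := by
  have hub : ∀ s ∈ input, s.toList.length ≤ C := by
    intro s hs
    have h1 := PySem.List.max?_isMax hmax (PySem.Str.len s) (List.mem_map_of_mem hs)
    rw [PySem.Str.len_eq] at h1
    simp only [id] at h1
    omega
  unfold to_ractangle_alt pvPadded
  simp only [hmax, Option.getD_some, List.map_map]
  apply List.ext_getElem
  · simp [PySem.List.length_pyRange_one]
  · intro i h1 h2
    simp only [List.length_map, PySem.List.length_pyRange_one] at h1
    have hi : i < input.length := by omega
    rw [List.getElem_map, List.getElem_map, PySem.List.getElem_pyRange_one]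
    have hcol : ∀ y : Int,
        PySem.List.pyGetD (input.map (fun row =>
          if y < PySem.Str.len row then String.mk [row.toList.getD y.toNat ' '] else "")) ((0:Int) + i) ""
        = (fun y => if y < ((input[i]).toList.length : Int)
            then String.mk [(input[i]).toList.getD y.toNat ' '] else "") y := by
      intro y
      rw [show ((0:Int) + i) = ((i : Nat) : Int) by push_cast; ring, PySem.List.pyGetD_natCast]
      simp [List.getD, List.getElem?_map, List.getElem?_eq_getElem hi, PySem.Str.len_eq]
    simp only [Function.comp_def]
    simp only [hcol]
    have := b_row (input[i]).toList (C : Int) (by exact_mod_cast hub _ (List.getElem_mem hi))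
    simpa using this

-- ===== VERDICT (by name: the statement is the Claim_ definition above) =====
theorem to_ractangle_spec : Claim_equal_to_ractangle := by
  intro input _ hpre
  unfold Spec_to_ractangle
  obtain ⟨x, xs, rfl⟩ : ∃ x xs, input = x :: xs := by
    cases input with
    | nil => exact absurd rfl hpre
    | cons x xs => exact ⟨x, xs, rfl⟩
  obtain ⟨m, hm⟩ : ∃ m, PySem.List.max? ((x :: xs).map (fun row => PySem.Str.len row)) id = some m := by
    have := max?_isSome_cons (PySem.Str.len x) (xs.map (fun row => PySem.Str.len row))
    simp only [List.map_cons]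
    exact Option.isSome_iff_exists.mp this
  have hm0 : 0 ≤ m := by
    have hmem := PySem.List.max?_mem hm
    simp only [List.mem_map] at hmem
    obtain ⟨s, _, hs⟩ := hmem
    rw [← hs, PySem.Str.len_eq]; positivity
  have hm' : PySem.List.max? ((x :: xs).map (fun row => PySem.Str.len row)) id = some ((m.toNat : Nat) : Int) := by
    rwa [Int.toNat_of_nonneg hm0]
  rw [a_eq_padded _ m.toNat hm', b_eq_padded _ m.toNat hm']
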